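-- pv_equiv track=rewrite | github.com/Jungsu-lilly/coding_test_study | 프로그래머스/lv3/송예은/불량 사용자.py | solution
-- ===== SOURCE A (Python) =====
-- from itertools import product
--
-- def findBlind(s):
--     cnt = []
--     for i in range(len(s)):
--         if s[i] == '*':
--             cnt.append(i)
--     return cnt
--
-- def changeToBlind(s,blind):
--     s = list(s)
--     for i in blind:
--         s[i] = '*'
--     return s
--
-- def solution(user_id, banned_id):
--     combi = [[] for i in range(len(banned_id))]
--
--     for idx,ban in enumerate(banned_id):
--         blind = findBlind(ban)
--         for user in user_id:
--             if len(user) == len(ban):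
--                 changedUser = changeToBlind(user,blind)
--                 if changedUser == list(ban) :
--                     combi[idx].append(user)
--
--     cartesian = (list(product(*combi)))
--     answer = []
--
--     for i in cartesian:
--         # 하나의 조합 내에 있는 중복 제거
--         i = set(list(i))
--         if len(i) == len(banned_id):
--             answer.append(tuple(sorted(i)))
--     # answer를 set으로 변환하여 조합 중복 제거
--     answer = set(answer)
--
--     return len(answer)
-- ===== SOURCE B (Python) =====
-- def solution(user_id, banned_id):
--     def matches(user, ban):
--         return len(user) == len(ban) and all(b == '*' or u == b for u, b in zip(user, ban))
--
--     found = set()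
--
--     def dfs(patterns, used):
--         if not patterns:
--             found.add(tuple(sorted(used)))
--             return
--         for user in user_id:
--             if user not in used and matches(user, patterns[0]):
--                 dfs(patterns[1:], used + [user])
--
--     dfs(banned_id, [])
--     return len(found)
-- ===== Notes on version B (the rewrite author's own statement) =====
-- stated objective: faster
-- what changed: A materialises the full cartesian product of the per-pattern candidate lists and then filters and deduplicates it; B does DFS/backtracking that assigns a distinct matching user to each pattern, skipping already-used users at each level and collecting the sorted user tuples in a set, so repeated-user branches are pruned instead of enumerated. Intended as faster; one timing-probe run measured B 1525x faster at n=4096 (random family), while on runs drawing the const family A simply times out so no ratio could be read.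
import Mathlib
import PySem

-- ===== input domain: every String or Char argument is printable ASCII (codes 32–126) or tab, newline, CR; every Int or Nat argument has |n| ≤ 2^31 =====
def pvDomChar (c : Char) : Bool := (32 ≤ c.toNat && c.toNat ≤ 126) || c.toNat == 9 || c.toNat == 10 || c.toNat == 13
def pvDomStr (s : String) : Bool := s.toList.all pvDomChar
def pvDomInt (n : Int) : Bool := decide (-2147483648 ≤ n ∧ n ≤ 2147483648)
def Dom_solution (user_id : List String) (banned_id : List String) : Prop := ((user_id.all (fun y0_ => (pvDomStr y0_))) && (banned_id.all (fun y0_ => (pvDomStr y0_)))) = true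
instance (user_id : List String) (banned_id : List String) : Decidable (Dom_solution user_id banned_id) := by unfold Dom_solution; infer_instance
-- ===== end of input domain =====

-- B replaces A's full cartesian product over the per-pattern candidate lists by DFS/backtracking that
-- assigns pairwise-distinct matching users pattern by pattern, deduplicating the sorted user tuples in a set as it goes
-- (alternative algorithm; equal return value is what is proved here).

-- ===== PORT A =====
-- s[i] = '*' inside changeToBlind: every call site passes indices from findBlind on a string of the
-- same length, so 0 ≤ i < len s and plain List.set at i.toNat is exact there.
def findBlind (s : String) : List Int :=
  (PySem.List.pyRange 0 (PySem.Str.len s) 1).foldl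
    (fun cnt i => if PySem.Str.pyGet? s i == some '*' then cnt ++ [i] else cnt) []

def changeToBlind (s : String) (blind : List Int) : List Char :=
  blind.foldl (fun l i => l.set i.toNat '*') s.toList

def productA (ls : List (List String)) : List (List String) :=
  match ls with
  | [] => [[]]
  | l :: rest => l.flatMap (fun x => (productA rest).map (x :: ·))

def solution (user_id : List String) (banned_id : List String) : Int :=
  let combi := banned_id.map (fun ban =>
    let blind := findBlind ban
    user_id.foldl (fun acc user =>
      if PySem.Str.len user == PySem.Str.len ban then
        if changeToBlind user blind == ban.toList then acc ++ [user] else acc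
      else acc) [])
  let cartesian := productA combi
  let answer := cartesian.foldl (fun ans i =>
    let iset : PySem.Set String := PySem.Set.ofList i
    if iset.length == banned_id.length then
      ans ++ [PySem.List.sorted iset (fun x => x) false]
    else ans) []
  ((PySem.Set.ofList answer).length : Int)

-- ===== PORT B =====
def matchesB (user ban : String) : Bool :=
  PySem.Str.len user == PySem.Str.len ban &&
  (user.toList.zip ban.toList).all (fun p => p.2 == '*' || p.1 == p.2)

def dfsB (user_id : List String) : List String → List String → PySem.Set (List String) → PySem.Set (List String)
  | [], used, found => PySem.Set.add found (PySem.List.sorted used (fun x => x) false)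
  | ban :: rest, used, found =>
      user_id.foldl (fun acc user =>
        if !used.contains user && matchesB user ban then dfsB user_id rest (used ++ [user]) acc
        else acc) found

def solution_alt (user_id : List String) (banned_id : List String) : Int :=
  ((dfsB user_id banned_id [] PySem.Set.empty).length : Int)

-- ===== PRECONDITION & SPEC =====
def Spec_solution (user_id : List String) (banned_id : List String) (out : Int) : Prop := out = solution_alt user_id banned_id
instance (user_id : List String) (banned_id : List String) (out : Int) : Decidable (Spec_solution user_id banned_id out) := by unfold Spec_solution; infer_instance

-- ===== CLAIM (what is proved, stated in full; the proofs are below) =====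
def Claim_equal_solution : Prop := ∀ (user_id : List String) (banned_id : List String), Dom_solution user_id banned_id → Spec_solution user_id banned_id (solution user_id banned_id)

-- ===== LEMMAS AND PROOFS =====
theorem mem_findBlind (s : String) (i : Int) :
    i ∈ findBlind s ↔ 0 ≤ i ∧ i.toNat < s.toList.length ∧ s.toList[i.toNat]? = some '*' := by
  unfold findBlind
  rw [PySem.List.foldl_append_if_eq_filter]
  simp only [List.nil_append, List.mem_filter, PySem.List.mem_pyRange_one, PySem.Str.len_eq]
  constructor
  · rintro ⟨⟨h0, hlt⟩, hp⟩
    simp only [PySem.Str.pyGet?] at hp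
    have hch : PySem.Chars.pyGet? s.toList i = PySem.List.pyGet? s.toList i := rfl
    rw [hch, PySem.List.pyGet?_of_nonneg _ h0] at hp
    simp at hp
    exact ⟨h0, by omega, hp⟩
  · rintro ⟨h0, hlt, hp⟩
    refine ⟨⟨h0, by omega⟩, ?_⟩
    simp only [PySem.Str.pyGet?]
    have hch : PySem.Chars.pyGet? s.toList i = PySem.List.pyGet? s.toList i := rfl
    rw [hch, PySem.List.pyGet?_of_nonneg _ h0]
    simp [hp]

theorem getElem?_changeFold (blind : List Int) (L : List Char)
    (h : ∀ i ∈ blind, 0 ≤ i ∧ i.toNat < L.length) (k : Nat) :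
    (blind.foldl (fun l i => l.set i.toNat '*') L)[k]?
      = if (k : Int) ∈ blind then some '*' else L[k]? := by
  induction blind generalizing L with
  | nil => simp
  | cons i bl ih =>
    have hi := h i (by simp)
    rw [List.foldl_cons,
      ih (L.set i.toNat '*') (fun j hj => by simpa using h j (List.mem_cons_of_mem _ hj))]
    by_cases hkb : (k : Int) ∈ bl
    · simp [hkb]
    · by_cases hki : (k : Int) = i
      · have hik : i.toNat = k := by omega
        have hklen : k < L.length := by omega
        simp [hki, hik, hklen]
      · have : i.toNat ≠ k := by omega
        simp [hkb, hki, this]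

theorem change_eq_iff (user ban : String) (hlen : user.toList.length = ban.toList.length) :
    changeToBlind user (findBlind ban) = ban.toList ↔
      ∀ k (hk : k < ban.toList.length), ban.toList[k] = '*' ∨ user.toList[k]'(by omega) = ban.toList[k] := by
  unfold changeToBlind
  have hb : ∀ i ∈ findBlind ban, 0 ≤ i ∧ i.toNat < user.toList.length := by
    intro i hi
    rcases (mem_findBlind ban i).1 hi with ⟨h0, hlt, _⟩
    exact ⟨h0, by omega⟩
  constructor
  · intro heq k hk
    have hku : k < user.toList.length := by omega
    have hgk := getElem?_changeFold (findBlind ban) user.toList hb k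
    rw [heq] at hgk
    by_cases hkb : (k : Int) ∈ findBlind ban
    · left
      rw [List.getElem?_eq_getElem hk] at hgk
      simp [hkb] at hgk
      exact hgk
    · right
      rw [List.getElem?_eq_getElem hk, List.getElem?_eq_getElem hku] at hgk
      simp [hkb] at hgk
      exact hgk.symm
  · intro hall
    apply List.ext_getElem?
    intro k
    rw [getElem?_changeFold (findBlind ban) user.toList hb k]
    by_cases hkb : (k : Int) ∈ findBlind ban
    · rcases (mem_findBlind ban (k : Int)).1 hkb with ⟨_, hkl, hstar⟩
      simp only [Int.toNat_natCast] at hkl hstar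
      simp [hkb, hstar.symm]
    · by_cases hk : k < ban.toList.length
      · rcases hall k hk with hstar | heq
        · exfalso
          apply hkb
          rw [mem_findBlind]
          refine ⟨by omega, by simpa using hk, ?_⟩
          simp [List.getElem?_eq_getElem hk, hstar]
        · rw [List.getElem?_eq_getElem hk, List.getElem?_eq_getElem (by omega : k < user.toList.length)]
          simp [hkb, heq]
      · rw [List.getElem?_eq_none (by omega), List.getElem?_eq_none (by omega)]
        simp [hkb]

theorem zip_all_iff (u b : List Char) (h : u.length = b.length) :
    ((u.zip b).all (fun p => p.2 == '*' || p.1 == p.2) = true) ↔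
      ∀ k (hk : k < b.length), b[k] = '*' ∨ u[k]'(by omega) = b[k] := by
  induction u generalizing b with
  | nil =>
    cases b with
    | nil => simp
    | cons y ys => simp at h
  | cons x xs ih =>
    cases b with
    | nil => simp at h
    | cons y ys =>
      simp only [List.zip_cons_cons, List.all_cons, Bool.and_eq_true,
        ih ys (by simpa using h)]
      constructor
      · rintro ⟨h1, h2⟩ k hk
        cases k with
        | zero => simpa using h1
        | succ n => simpa using h2 n (by simpa using hk)
      · intro hall
        refine ⟨by simpa using hall 0 (by simp), fun k hk => by simpa using hall (k+1) (by simpa using hk)⟩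

def matchA (user ban : String) : Bool :=
  (PySem.Str.len user == PySem.Str.len ban) && (changeToBlind user (findBlind ban) == ban.toList)

theorem str_len_eq_toList (s : String) : PySem.Str.len s = (s.toList.length : Int) := by
  rw [PySem.Str.len_eq]

theorem matchA_eq (user ban : String) : matchA user ban = matchesB user ban := by
  rw [Bool.eq_iff_iff]
  unfold matchA matchesB
  simp only [Bool.and_eq_true, beq_iff_eq, str_len_eq_toList]
  constructor
  · rintro ⟨hl, hc⟩
    have hlen : user.toList.length = ban.toList.length := by exact_mod_cast hl
    exact ⟨hl, (zip_all_iff _ _ hlen).2 ((change_eq_iff _ _ hlen).1 hc)⟩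
  · rintro ⟨hl, hz⟩
    have hlen : user.toList.length = ban.toList.length := by exact_mod_cast hl
    exact ⟨hl, (change_eq_iff _ _ hlen).2 ((zip_all_iff _ _ hlen).1 hz)⟩

theorem mem_productA (ls : List (List String)) (t : List String) :
    t ∈ productA ls ↔ List.Forall₂ (fun x l => x ∈ l) t ls := by
  induction ls generalizing t with
  | nil =>
    simp only [productA, List.mem_singleton, List.forall₂_nil_right_iff]
  | cons l rest ih =>
    simp only [productA, List.mem_flatMap, List.mem_map]
    constructor
    · rintro ⟨x, hx, r, hr, rfl⟩
      exact List.Forall₂.cons hx ((ih r).1 hr)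
    · intro h
      cases h with
      | cons hx hr => exact ⟨_, hx, _, (ih _).2 hr, rfl⟩

theorem ofList_length_eq_iff_nodup (t : List String) :
    (PySem.Set.ofList t).length = t.length ↔ t.Nodup := by
  constructor
  · intro h
    have hperm : (PySem.Set.ofList t).Perm t.dedup := by
      rw [List.perm_ext_iff_of_nodup (PySem.Set.nodup_ofList t) t.nodup_dedup]
      intro a
      rw [PySem.Set.mem_ofList, List.mem_dedup]
    have hlen : t.dedup.length = t.length := by
      rw [← hperm.length_eq, h]
    have := List.Sublist.eq_of_length (List.dedup_sublist t) hlen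
    rw [← List.dedup_eq_self]
    exact this
  · intro h
    rw [PySem.Set.ofList_eq_self_of_nodup t h]

theorem foldl_pres {α β : Type} (f : β → α → β) (P : β → Prop) (l : List α) (init : β)
    (hf : ∀ acc u, u ∈ l → P acc → P (f acc u)) (h : P init) : P (l.foldl f init) := by
  induction l generalizing init with
  | nil => exact h
  | cons a l ih =>
    exact ih (f init a) (fun acc u hu => hf acc u (List.mem_cons_of_mem _ hu))
      (hf init a (by simp) h)

theorem nodup_dfsB (U : List String) (patterns : List String) :
    ∀ (used : List String) (found : PySem.Set (List String)), found.Nodup →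
      (dfsB U patterns used found).Nodup := by
  induction patterns with
  | nil =>
    intro used found h
    exact PySem.Set.nodup_add _ _ h
  | cons ban rest ih =>
    intro used found h
    refine foldl_pres _ (fun s => s.Nodup) U found ?_ h
    intro acc u _ hacc
    dsimp only
    split_ifs with hc
    · exact ih (used ++ [u]) acc hacc
    · exact hacc

theorem cond_true_iff (used : List String) (u ban : String) :
    (!used.contains u && matchesB u ban) = true ↔ u ∉ used ∧ matchesB u ban = true := by
  simp

theorem mem_foldl_iff (x : List String) (l : List String) (c : String → Bool)
    (g : String → PySem.Set (List String) → PySem.Set (List String)) (Q : String → Prop)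
    (hg : ∀ u acc, x ∈ g u acc ↔ x ∈ acc ∨ Q u) :
    ∀ found, x ∈ l.foldl (fun acc u => if c u then g u acc else acc) found ↔
      x ∈ found ∨ ∃ u ∈ l, c u = true ∧ Q u := by
  induction l with
  | nil => simp
  | cons a l ih =>
    intro found
    rw [List.foldl_cons, ih]
    by_cases hc : c a = true
    · rw [if_pos hc, hg a found]
      constructor
      · rintro ((hx | hq) | ⟨u, hu, hcu, hqu⟩)
        · exact Or.inl hx
        · exact Or.inr ⟨a, by simp, hc, hq⟩
        · exact Or.inr ⟨u, List.mem_cons_of_mem _ hu, hcu, hqu⟩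
      · rintro (hx | ⟨u, hu, hcu, hqu⟩)
        · exact Or.inl (Or.inl hx)
        · rcases List.mem_cons.1 hu with rfl | hu'
          · exact Or.inl (Or.inr hqu)
          · exact Or.inr ⟨u, hu', hcu, hqu⟩
    · rw [if_neg hc]
      constructor
      · rintro (hx | ⟨u, hu, hcu, hqu⟩)
        · exact Or.inl hx
        · exact Or.inr ⟨u, List.mem_cons_of_mem _ hu, hcu, hqu⟩
      · rintro (hx | ⟨u, hu, hcu, hqu⟩)
        · exact Or.inl hx
        · rcases List.mem_cons.1 hu with rfl | hu'
          · exact absurd hcu hc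
          · exact Or.inr ⟨u, hu', hcu, hqu⟩

theorem mem_dfsB (U : List String) (patterns : List String) :
    ∀ (used : List String) (found : PySem.Set (List String)) (x : List String),
      x ∈ dfsB U patterns used found ↔
        x ∈ found ∨ ∃ t, List.Forall₂ (fun u ban => u ∈ U ∧ matchesB u ban = true) t patterns ∧
          t.Nodup ∧ (∀ u ∈ t, u ∉ used) ∧ x = PySem.List.sorted (used ++ t) (fun y => y) false := by
  induction patterns with
  | nil =>
    intro used found x
    simp only [dfsB, PySem.Set.mem_add, List.forall₂_nil_right_iff]
    constructor
    · rintro (hx | rfl)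
      · exact Or.inl hx
      · exact Or.inr ⟨[], rfl, by simp⟩
    · rintro (hx | ⟨t, rfl, _, _, rfl⟩)
      · exact Or.inl hx
      · simp
  | cons ban rest ih =>
    intro used found x
    show x ∈ U.foldl (fun acc user =>
        if !used.contains user && matchesB user ban then dfsB U rest (used ++ [user]) acc
        else acc) found ↔ _
    rw [mem_foldl_iff x U (fun user => !used.contains user && matchesB user ban)
      (fun user acc => dfsB U rest (used ++ [user]) acc)
      (fun user => ∃ t, List.Forall₂ (fun u ban => u ∈ U ∧ matchesB u ban = true) t rest ∧
        t.Nodup ∧ (∀ u ∈ t, u ∉ used ++ [user]) ∧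
        x = PySem.List.sorted ((used ++ [user]) ++ t) (fun y => y) false)
      (fun u acc => ih (used ++ [u]) acc x)]
    constructor
    · rintro (hx | ⟨u, hu, hcu, t', hf, hnd, hnu, rfl⟩)
      · exact Or.inl hx
      · rcases (cond_true_iff used u ban).1 hcu with ⟨hunu, hmu⟩
        refine Or.inr ⟨u :: t', List.Forall₂.cons ⟨hu, hmu⟩ hf, ?_, ?_, ?_⟩
        · refine List.nodup_cons.2 ⟨fun hmem => ?_, hnd⟩
          exact (hnu u hmem) (by simp)
        · intro v hv
          rcases List.mem_cons.1 hv with rfl | hv'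
          · exact hunu
          · intro hvu
            exact (hnu v hv') (by simp [hvu])
        · simp
    · rintro (hx | ⟨t, hf, hnd, hnu, rfl⟩)
      · exact Or.inl hx
      · rcases List.forall₂_cons_right_iff.1 hf with ⟨u, t', ⟨huU, hum⟩, hf', rfl⟩
        refine Or.inr ⟨u, huU, (cond_true_iff used u ban).2 ⟨hnu u (by simp), hum⟩,
          t', hf', (List.nodup_cons.1 hnd).2, ?_, ?_⟩
        · intro v hv
          simp only [List.mem_append, List.mem_singleton]
          rintro (hvu | rfl)
          · exact (hnu v (List.mem_cons_of_mem _ hv)) hvu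
          · exact (List.nodup_cons.1 hnd).1 hv
        · simp

theorem solution_eq (U B : List String) : solution U B = solution_alt U B := by
  have hcand : ∀ ban, (U.foldl (fun acc user =>
      if PySem.Str.len user == PySem.Str.len ban then
        if changeToBlind user (findBlind ban) == ban.toList then acc ++ [user] else acc
      else acc) []) = U.filter (fun u => matchA u ban) := by
    intro ban
    have hpt : ∀ (acc : List String) (u : String), u ∈ U →
        (if PySem.Str.len u == PySem.Str.len ban then
          if changeToBlind u (findBlind ban) == ban.toList then acc ++ [u] else acc
        else acc) = (if matchA u ban then acc ++ [u] else acc) := by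
      intro acc u _
      unfold matchA
      cases h1 : (PySem.Str.len u == PySem.Str.len ban) <;>
        cases h2 : (changeToBlind u (findBlind ban) == ban.toList) <;> simp [h1, h2]
    rw [PySem.List.foldl_congr_mem U _ _ _ hpt, PySem.List.foldl_append_if_eq_filter]
    simp
  have hansA : solution U B = ((PySem.Set.ofList
      (((productA (B.map (fun ban => U.filter (fun u => matchA u ban)))).filter
          (fun i => (PySem.Set.ofList i).length == B.length)).map
        (fun i => PySem.List.sorted (PySem.Set.ofList i) (fun x => x) false))).length : Int) := by
    show ((PySem.Set.ofList ((productA (B.map (fun ban => U.foldl (fun acc user =>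
      if PySem.Str.len user == PySem.Str.len ban then
        if changeToBlind user (findBlind ban) == ban.toList then acc ++ [user] else acc
      else acc) []))).foldl (fun ans i =>
        if (PySem.Set.ofList i).length == B.length then
          ans ++ [PySem.List.sorted (PySem.Set.ofList i) (fun x => x) false]
        else ans) [])).length : Int) = _
    rw [PySem.List.foldl_append_if
      (p := fun i => (PySem.Set.ofList i).length == B.length)
      (f := fun i => PySem.List.sorted (PySem.Set.ofList i) (fun x => x) false)]
    simp only [List.nil_append, hcand]
  rw [hansA]
  unfold solution_alt
  have hB : ∀ x, x ∈ dfsB U B [] PySem.Set.empty ↔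
      ∃ t, List.Forall₂ (fun u ban => u ∈ U ∧ matchesB u ban = true) t B ∧ t.Nodup ∧
        x = PySem.List.sorted t (fun y => y) false := by
    intro x
    rw [mem_dfsB U B [] PySem.Set.empty x]
    constructor
    · rintro (hx | ⟨t, hf, hnd, _, rfl⟩)
      · exact absurd hx (List.not_mem_nil)
      · exact ⟨t, hf, hnd, by simp⟩
    · rintro ⟨t, hf, hnd, rfl⟩
      exact Or.inr ⟨t, hf, hnd, by simp, by simp⟩
  have hA : ∀ x, x ∈ PySem.Set.ofList
      (((productA (B.map (fun ban => U.filter (fun u => matchA u ban)))).filter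
          (fun i => (PySem.Set.ofList i).length == B.length)).map
        (fun i => PySem.List.sorted (PySem.Set.ofList i) (fun x => x) false)) ↔
      ∃ t, List.Forall₂ (fun u ban => u ∈ U ∧ matchesB u ban = true) t B ∧ t.Nodup ∧
        x = PySem.List.sorted t (fun y => y) false := by
    intro x
    rw [PySem.Set.mem_ofList, List.mem_map]
    constructor
    · rintro ⟨i, hi, rfl⟩
      rw [List.mem_filter] at hi
      obtain ⟨hip, hplen⟩ := hi
      rw [mem_productA, List.forall₂_map_right_iff] at hip
      have hlen : i.length = B.length := by
        simpa using hip.length_eq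
      have hnd : i.Nodup := by
        rw [← ofList_length_eq_iff_nodup, hlen]
        simpa using hplen
      refine ⟨i, ?_, hnd, by rw [PySem.Set.ofList_eq_self_of_nodup i hnd]⟩
      refine hip.imp ?_
      intro u ban hm
      rw [List.mem_filter, matchA_eq] at hm
      exact hm
    · rintro ⟨t, hf, hnd, rfl⟩
      refine ⟨t, ?_, by rw [PySem.Set.ofList_eq_self_of_nodup t hnd]⟩
      rw [List.mem_filter]
      constructor
      · rw [mem_productA, List.forall₂_map_right_iff]
        refine hf.imp ?_
        intro u ban hm
        rw [List.mem_filter, matchA_eq]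
        exact hm
      · have hlen : t.length = B.length := hf.length_eq
        simp only [beq_iff_eq, PySem.Set.ofList_eq_self_of_nodup t hnd]
        exact hlen
  have hperm : (PySem.Set.ofList
      (((productA (B.map (fun ban => U.filter (fun u => matchA u ban)))).filter
          (fun i => (PySem.Set.ofList i).length == B.length)).map
        (fun i => PySem.List.sorted (PySem.Set.ofList i) (fun x => x) false))).Perm
      (dfsB U B [] PySem.Set.empty) := by
    rw [List.perm_ext_iff_of_nodup (PySem.Set.nodup_ofList _)
      (nodup_dfsB U B [] PySem.Set.empty List.nodup_nil)]
    intro a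
    rw [hA a, hB a]
  exact_mod_cast congrArg Nat.cast hperm.length_eq

-- ===== VERDICT (by name: the statement is the Claim_ definition above) =====
theorem solution_spec : Claim_equal_solution := by
  intro user_id banned_id _
  unfold Spec_solution
  exact solution_eq user_id banned_id
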